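-- pv_equiv track=rewrite | github.com/JILSPATEL/Coding_question | TCS_NQT/NQT_LenOfSubstringLessThanString.py | noOfSubstring
-- ===== SOURCE A (Python) =====
-- def noOfSubstring(strLen, str1):
--     # s1=set(str1)
--     count = 0
--     sum = 0
--     len1 = len(str1)
--     for i in range(len1):
--         sum += int(str1[i])
--         if (sum <= strLen):
--             count += 1
--     return count
-- ===== SOURCE B (Python) =====
-- def noOfSubstring(strLen, str1):
--     # Build the prefix-sum list, then binary-search (bisect_right by hand,
--     # A uses no imports) for the first prefix sum exceeding strLen; since
--     # digits are non-negative the prefix sums are non-decreasing, so that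
--     # index is exactly the number of prefixes with sum <= strLen.
--     prefix = []
--     s = 0
--     for c in str1:
--         s += int(c)
--         prefix.append(s)
--     lo, hi = 0, len(prefix)
--     while lo < hi:
--         mid = (lo + hi) // 2
--         if prefix[mid] <= strLen:
--             lo = mid + 1
--         else:
--             hi = mid
--     return lo
-- ===== Notes on version B (the rewrite author's own statement) =====
-- stated objective: alternative
-- what changed: Replaces the scan-and-count loop by materializing the prefix-sum list and binary-searching (bisect_right by hand) for the first prefix sum exceeding strLen, valid because digit prefix sums are non-decreasing.
import Mathlib
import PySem

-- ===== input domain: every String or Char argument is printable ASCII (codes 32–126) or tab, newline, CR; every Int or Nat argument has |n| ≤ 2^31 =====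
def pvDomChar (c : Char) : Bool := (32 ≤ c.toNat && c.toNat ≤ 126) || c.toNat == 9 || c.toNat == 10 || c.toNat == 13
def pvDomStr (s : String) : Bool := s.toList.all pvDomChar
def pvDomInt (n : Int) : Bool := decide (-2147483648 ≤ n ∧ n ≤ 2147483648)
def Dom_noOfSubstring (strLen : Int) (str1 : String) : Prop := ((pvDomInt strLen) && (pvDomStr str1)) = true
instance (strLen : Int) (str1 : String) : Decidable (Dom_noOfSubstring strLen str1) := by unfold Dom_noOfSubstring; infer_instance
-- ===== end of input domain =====

-- B replaces A's scan-and-count with: build the prefix-sum list, then binary-search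
-- (hand-written bisect_right) for the first prefix sum exceeding strLen; equal on
-- all-digit strings (Pre_), where A returns normally.

-- ===== PORT A =====
-- int(str1[i]) for one character; under Pre_ the character is a digit, so the
-- `getD 0` default (Python's ValueError case) is never reached.
def pvDigit (c : Char) : Int := (PySem.Int.ofStr? (String.ofList [c])).getD 0

-- loop body: sum += int(str1[i]); if sum <= strLen: count += 1   (state = (count, sum))
def pvStepA (strLen : Int) (st : Int × Int) (c : Char) : Int × Int :=
  let sum := st.2 + pvDigit c
  (if sum ≤ strLen then st.1 + 1 else st.1, sum)

def noOfSubstring (strLen : Int) (str1 : String) : Int :=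
  (str1.toList.foldl (pvStepA strLen) (0, 0)).1

-- ===== PORT B =====
-- loop body: s += int(c); prefix.append(s)   (state = (prefix, s))
def pvStepB (st : List Int × Int) (c : Char) : List Int × Int :=
  let s := st.2 + pvDigit c
  (st.1 ++ [s], s)

-- while lo < hi: mid = (lo+hi)//2; …   lo, hi stay in [0, len prefix] and
-- mid < hi, so `getD … 0` is the in-range prefix[mid].
def pvBisect (pre : List Int) (strLen : Int) (lo hi : Nat) : Nat :=
  if _h : lo < hi then
    let mid := (lo + hi) / 2
    if pre.getD mid 0 ≤ strLen then pvBisect pre strLen (mid + 1) hi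
    else pvBisect pre strLen lo mid
  else lo
termination_by hi - lo
decreasing_by all_goals omega

def noOfSubstring_alt (strLen : Int) (str1 : String) : Int :=
  let ps := (str1.toList.foldl pvStepB ([], 0)).1
  (pvBisect ps strLen 0 ps.length : Int)

-- ===== PRECONDITION & SPEC =====
-- Pre_: every character of str1 is a decimal digit; on any other character the
-- Python A raises ValueError at int(str1[i]) instead of returning.
def Pre_noOfSubstring (strLen : Int) (str1 : String) : Prop :=
  str1.toList.all Char.isDigit = true
instance (strLen : Int) (str1 : String) : Decidable (Pre_noOfSubstring strLen str1) := by unfold Pre_noOfSubstring; infer_instance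

def pvWitness_noOfSubstring : Int × String := (5, "1203")

def Spec_noOfSubstring (strLen : Int) (str1 : String) (out : Int) : Prop := out = noOfSubstring_alt strLen str1
instance (strLen : Int) (str1 : String) (out : Int) : Decidable (Spec_noOfSubstring strLen str1 out) := by unfold Spec_noOfSubstring; infer_instance

-- ===== CLAIM (what is proved, stated in full; the proofs are below) =====
def Claim_equal_noOfSubstring : Prop := ∀ (strLen : Int) (str1 : String), Dom_noOfSubstring strLen str1 → Pre_noOfSubstring strLen str1 → Spec_noOfSubstring strLen str1 (noOfSubstring strLen str1)

-- ===== LEMMAS AND PROOFS =====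

-- the list of prefix sums of digit values, continuing from running sum s
def psums (s : Int) : List Char → List Int
  | [] => []
  | c :: cs => (s + pvDigit c) :: psums (s + pvDigit c) cs

theorem pvDigit_nonneg (c : Char) (h : c.isDigit = true) : 0 ≤ pvDigit c := by
  have hb : 48 ≤ c.toNat ∧ c.toNat ≤ 57 := by
    simp [Char.isDigit] at h; exact h
  obtain ⟨h1, h2⟩ := hb
  have hc : Char.ofNat c.toNat = c := Char.ofNat_toNat c
  interval_cases hn : c.toNat <;> (rw [← hc]; decide)

-- A's fold counts the prefix sums ≤ strLen
theorem foldA_eq (x : Int) : ∀ (cs : List Char) (count s : Int),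
    (cs.foldl (pvStepA x) (count, s)).1
      = count + ((psums s cs).countP (fun y => decide (y ≤ x)) : Int) := by
  intro cs
  induction cs with
  | nil => intro count s; simp [psums]
  | cons c cs ih =>
    intro count s
    simp only [List.foldl_cons, pvStepA, psums, List.countP_cons]
    rw [ih]
    by_cases h : s + pvDigit c ≤ x <;> simp [h] <;> push_cast <;> ring

-- B's fold materializes the prefix-sum list
theorem foldB_eq : ∀ (cs : List Char) (acc : List Int) (s : Int),
    cs.foldl pvStepB (acc, s) = (acc ++ psums s cs, s + (cs.map pvDigit).sum) := by
  intro cs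
  induction cs with
  | nil => intro acc s; simp [psums]
  | cons c cs ih =>
    intro acc s
    simp only [List.foldl_cons, pvStepB, psums, List.map_cons, List.sum_cons]
    rw [ih]
    simp [List.append_assoc]
    ring

theorem psums_lower : ∀ (cs : List Char) (s : Int),
    (∀ c ∈ cs, c.isDigit = true) → ∀ y ∈ psums s cs, s ≤ y := by
  intro cs
  induction cs with
  | nil => intro s _ y hy; simp [psums] at hy
  | cons c cs ih =>
    intro s hall y hy
    have hd : 0 ≤ pvDigit c := pvDigit_nonneg c (hall c (by simp))
    simp only [psums, List.mem_cons] at hy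
    rcases hy with rfl | hy
    · omega
    · have := ih (s + pvDigit c) (fun c' hc' => hall c' (by simp [hc'])) y hy
      omega

theorem psums_pairwise : ∀ (cs : List Char) (s : Int),
    (∀ c ∈ cs, c.isDigit = true) → (psums s cs).Pairwise (· ≤ ·) := by
  intro cs
  induction cs with
  | nil => intro s _; simp [psums]
  | cons c cs ih =>
    intro s hall
    have htail : ∀ c' ∈ cs, c'.isDigit = true := fun c' hc' => hall c' (by simp [hc'])
    refine List.Pairwise.cons ?_ (ih (s + pvDigit c) htail)
    intro y hy
    exact psums_lower cs (s + pvDigit c) htail y hy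
  
-- a 0/1 split characterizes countP on any list
theorem countP_of_split (x : Int) : ∀ (l : List Int) (k : Nat), k ≤ l.length →
    (∀ i (h : i < l.length), (l[i] ≤ x ↔ i < k)) →
    l.countP (fun y => decide (y ≤ x)) = k := by
  intro l
  induction l with
  | nil => intro k hk _; simp at hk ⊢; omega
  | cons a t ih =>
    intro k hk hiff
    cases k with
    | zero =>
      have ha : ¬ a ≤ x := by
        have := hiff 0 (by simp)
        simpa using this
      have ht : t.countP (fun y => decide (y ≤ x)) = 0 := by
        apply ih 0 (by omega)
        intro i h
        have := hiff (i + 1) (by simpa using Nat.succ_lt_succ h)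
        simpa using this
      simp [ha, ht]
    | succ k' =>
      have ha : a ≤ x := by
        have := hiff 0 (by simp)
        simp at this; omega
      have ht : t.countP (fun y => decide (y ≤ x)) = k' := by
        apply ih k' (by simp at hk; omega)
        intro i h
        have := hiff (i + 1) (by simpa using Nat.succ_lt_succ h)
        simpa using this
      simp [ha, ht]

theorem pvBisect_eq (x : Int) (l : List Int) (hs : l.Pairwise (· ≤ ·)) :
    ∀ (n lo hi : Nat), hi - lo ≤ n → lo ≤ hi → hi ≤ l.length →
    (∀ i (h : i < l.length), i < lo → l[i] ≤ x) →
    (∀ i (h : i < l.length), hi ≤ i → ¬ l[i] ≤ x) →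
    pvBisect l x lo hi = l.countP (fun y => decide (y ≤ x)) := by
  have hmono : ∀ i j (hi : i < l.length) (hj : j < l.length), i < j → l[i] ≤ l[j] := by
    intro i j hi hj hij
    exact (List.pairwise_iff_getElem.mp hs) i j hi hj hij
  intro n
  induction n with
  | zero =>
    intro lo hi h0 h1 h2 H1 H2
    have hlt : ¬ lo < hi := by omega
    rw [pvBisect]; simp only [hlt, dite_false]
    refine (countP_of_split x l lo (by omega) ?_).symm
    intro i h
    constructor
    · intro hle
      by_contra hge
      exact H2 i h (by omega) hle
    · intro hilo; exact H1 i h hilo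
  | succ n ih =>
    intro lo hi h0 h1 h2 H1 H2
    by_cases hlt : lo < hi
    · rw [pvBisect]; simp only [hlt, dite_true]
      have hmlo : lo ≤ (lo + hi) / 2 := by omega
      have hmhi : (lo + hi) / 2 < hi := by omega
      have hmlen : (lo + hi) / 2 < l.length := by omega
      rw [List.getD_eq_getElem l 0 hmlen]
      by_cases hmid : l[(lo + hi) / 2] ≤ x
      · simp only [hmid, if_true]
        apply ih ((lo + hi) / 2 + 1) hi (by omega) (by omega) h2 ?_ H2
        intro i h hilt
        rcases Nat.lt_or_ge i ((lo + hi) / 2) with hi' | hi'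
        · exact le_trans (hmono i _ h hmlen hi') hmid
        · have : i = (lo + hi) / 2 := by omega
          subst this; exact hmid
      · simp only [hmid, if_false]
        apply ih lo ((lo + hi) / 2) (by omega) (by omega) (by omega) H1 ?_
        intro i h hile
        rcases Nat.lt_or_ge ((lo + hi) / 2) i with hi' | hi'
        · intro hle
          exact hmid (le_trans (hmono _ i hmlen h hi') hle)
        · have : i = (lo + hi) / 2 := by omega
          subst this; exact hmid
    · rw [pvBisect]; simp only [hlt, dite_false]
      refine (countP_of_split x l lo (by omega) ?_).symm
      intro i h
      constructor
      · intro hle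
        by_contra hge
        exact H2 i h (by omega) hle
      · intro hilo; exact H1 i h hilo

-- ===== VERDICT (by name: the statement is the Claim_ definition above) =====
theorem noOfSubstring_spec : Claim_equal_noOfSubstring := by
  intro strLen str1 _hDom hPre
  unfold Spec_noOfSubstring noOfSubstring noOfSubstring_alt
  have hall : ∀ c ∈ str1.toList, c.isDigit = true := by
    intro c hc
    exact List.all_eq_true.mp hPre c hc
  rw [foldB_eq str1.toList [] 0]
  simp only [List.nil_append]
  rw [foldA_eq strLen str1.toList 0 0]
  rw [pvBisect_eq strLen (psums 0 str1.toList) (psums_pairwise str1.toList 0 hall)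
        (psums 0 str1.toList).length 0 (psums 0 str1.toList).length
        (by omega) (by omega) (le_refl _)
        (fun i h hlt => absurd hlt (by omega))
        (fun i h hge => absurd h (by omega))]
  simp
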